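-- pv_equiv track=rewrite | github.com/johanesn/CTCI-Practice | CTCI 8_5.py | recursive_multiply
-- ===== SOURCE A (Python) =====
-- def recursive_multiply (a, b):
-- 	print ('a: ', a, ' b: ',b)
-- 	if a < b:
-- 		return recursive_multiply(b,a)
--
-- 	elif b!=0:
-- 		return (a + recursive_multiply(a, b-1))
--
-- 	else:
-- 		return 0
-- ===== SOURCE B (Python) =====
-- def recursive_multiply(a, b):
--     print('a: ', a, ' b: ', b)
--     if a < b:
--         x, y = b, a
--         print('a: ', x, ' b: ', y)
--     else:
--         x, y = a, b
--     result = 0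
--     while y != 0:
--         result += x
--         y -= 1
--         print('a: ', x, ' b: ', y)
--     return result
-- ===== Notes on version B (the rewrite author's own statement) =====
-- stated objective: alternative
-- what changed: Replaces A's recursion (one swap call plus a chain of a + f(a, b-1) frames) by an iterative accumulator loop (result += x; y -= 1) with the same print order and the same product.
import Mathlib
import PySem

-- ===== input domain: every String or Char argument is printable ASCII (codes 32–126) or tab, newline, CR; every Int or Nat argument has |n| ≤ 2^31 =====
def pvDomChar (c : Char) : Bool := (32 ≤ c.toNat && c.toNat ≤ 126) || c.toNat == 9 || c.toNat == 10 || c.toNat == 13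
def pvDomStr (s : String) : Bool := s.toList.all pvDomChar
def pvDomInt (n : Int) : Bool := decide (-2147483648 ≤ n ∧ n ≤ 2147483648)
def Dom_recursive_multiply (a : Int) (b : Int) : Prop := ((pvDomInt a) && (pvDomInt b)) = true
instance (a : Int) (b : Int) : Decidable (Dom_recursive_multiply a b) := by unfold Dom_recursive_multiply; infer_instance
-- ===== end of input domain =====

-- B replaces A's recursion by an iterative accumulator loop with the same print order ('alternative');
-- equivalence is about the RETURN value only (the prints are side effects, checked by hand to match).

-- ===== PORT A =====
-- literal port of A's recursion; the '0 < b' guard is Python's 'b != 0' made total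
-- (inside Pre_ the recursion only ever sees b ≥ 0, where the two tests agree).
def recursive_multiply (a : Int) (b : Int) : Int :=
  if a < b then recursive_multiply b a
  else if 0 < b then a + recursive_multiply a (b - 1)
  else 0
termination_by b.toNat + (if a < b then 1 else 0)
decreasing_by
  · have h1 : ¬ b < a := by omega
    simp only [if_neg h1, if_pos (by assumption : a < b)]
    omega
  · split <;> omega

-- ===== PORT B =====
-- the 'while y != 0' loop of Source B; '0 < y' is 'y ≠ 0' made total (inside Pre_ y ≥ 0 throughout).
def rmLoop (x : Int) (y : Int) (result : Int) : Int :=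
  if 0 < y then rmLoop x (y - 1) (result + x) else result
termination_by y.toNat
decreasing_by omega

def recursive_multiply_alt (a : Int) (b : Int) : Int :=
  let p := if a < b then (b, a) else (a, b)
  rmLoop p.1 p.2 0

-- ===== PRECONDITION & SPEC =====
-- A recurses forever (RecursionError) when either argument is negative; Source B's loop diverges there too.
def Pre_recursive_multiply (a : Int) (b : Int) : Prop := 0 ≤ a ∧ 0 ≤ b
instance (a : Int) (b : Int) : Decidable (Pre_recursive_multiply a b) := by unfold Pre_recursive_multiply; infer_instance
def pvWitness_recursive_multiply : Int × Int := (4, 7)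

def Spec_recursive_multiply (a : Int) (b : Int) (out : Int) : Prop := out = recursive_multiply_alt a b
instance (a : Int) (b : Int) (out : Int) : Decidable (Spec_recursive_multiply a b out) := by unfold Spec_recursive_multiply; infer_instance

-- ===== CLAIM (what is proved, stated in full; the proofs are below) =====
def Claim_equal_recursive_multiply : Prop := ∀ (a : Int) (b : Int), Dom_recursive_multiply a b → Pre_recursive_multiply a b → Spec_recursive_multiply a b (recursive_multiply a b)

-- ===== LEMMAS AND PROOFS =====

theorem rmLoop_eq (x : Int) : ∀ (n : Nat) (y r : Int), y = (n : Int) → rmLoop x y r = r + x * y := by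
  intro n
  induction n with
  | zero => intro y r hy; subst hy; rw [rmLoop]; simp
  | succ k ih =>
      intro y r hy
      rw [rmLoop]
      rw [if_pos (by omega)]
      rw [ih (y - 1) (r + x) (by omega)]
      ring

theorem rm_ge (a : Int) : ∀ (n : Nat) (b : Int), b = (n : Int) → b ≤ a → recursive_multiply a b = a * b := by
  intro n
  induction n with
  | zero => intro b hb hba; subst hb; rw [recursive_multiply, if_neg (by omega), if_neg (by omega)]; simp
  | succ k ih =>
      intro b hb hba
      rw [recursive_multiply]
      rw [if_neg (by omega), if_pos (by omega)]
      rw [ih (b - 1) (by omega) (by omega)]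
      ring

theorem rm_mul (a b : Int) (ha : 0 ≤ a) (hb : 0 ≤ b) : recursive_multiply a b = a * b := by
  by_cases h : a < b
  · rw [recursive_multiply, if_pos h, rm_ge b a.toNat a (by omega) (le_of_lt h)]
    ring
  · exact rm_ge a b.toNat b (by omega) (by omega)

-- ===== VERDICT (by name: the statement is the Claim_ definition above) =====
theorem recursive_multiply_spec : Claim_equal_recursive_multiply := by
  intro a b _ hpre
  obtain ⟨ha, hb⟩ := hpre
  unfold Spec_recursive_multiply recursive_multiply_alt
  by_cases h : a < b <;> simp only [h, if_true, if_false]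
  · rw [rmLoop_eq b a.toNat a 0 (by omega), rm_mul a b ha hb]; ring
  · rw [rmLoop_eq a b.toNat b 0 (by omega), rm_mul a b ha hb]; ring
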